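-- pv_equiv track=rewrite | github.com/proofgrammers/www.proofgrammers.com | slides/teams/teamsix/week9/pure_python.py | lastTtoA_pure_python
-- ===== SOURCE A (Python) =====
-- def lastTtoA_pure_python(dna_string):
--     """
--     Replace the last occurrence of 'T' with 'A' in a DNA string.
--     Uses only built-in Python functionality, no external libraries.
--
--     Algorithm:
--     1. Convert string to list for easier manipulation
--     2. Scan from right to left to find last 'T'
--     3. Replace the last 'T' with 'A' if found
--     4. Convert back to string and return
--
--     Time Complexity: O(n)
--     Space Complexity: O(n)
--
--     Args:
--         dna_string (str): DNA string containing only A, C, T, G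
--
--     Returns:
--         str: Modified string with last T replaced by A
--     """
--     if not dna_string:
--         return dna_string
--
--     # Convert to list for easier manipulation
--     dna_list = list(dna_string)
--
--     # Find the last occurrence of 'T' by scanning backwards
--     last_t_index = -1
--     for i in range(len(dna_list) - 1, -1, -1):
--         if dna_list[i] == 'T':
--             last_t_index = i
--             break
--
--     # Replace the last 'T' with 'A' if found
--     if last_t_index != -1:
--         dna_list[last_t_index] = 'A'
--
--     return ''.join(dna_list)
-- ===== SOURCE B (Python) =====
-- def lastTtoA_pure_python(dna_string):
--     # Reverse, replace the first 'T' (= last of the original) once, reverse back.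
--     return dna_string[::-1].replace('T', 'A', 1)[::-1]
-- ===== Notes on version B (the rewrite author's own statement) =====
-- stated objective: idiomatic
-- what changed: B is a single expression with no index bookkeeping and no list mutation: it reverses the string, applies str.replace with count 1 (C-level, replacing only the first occurrence of the target base, which is the last of the original), and reverses back.
import Mathlib
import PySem

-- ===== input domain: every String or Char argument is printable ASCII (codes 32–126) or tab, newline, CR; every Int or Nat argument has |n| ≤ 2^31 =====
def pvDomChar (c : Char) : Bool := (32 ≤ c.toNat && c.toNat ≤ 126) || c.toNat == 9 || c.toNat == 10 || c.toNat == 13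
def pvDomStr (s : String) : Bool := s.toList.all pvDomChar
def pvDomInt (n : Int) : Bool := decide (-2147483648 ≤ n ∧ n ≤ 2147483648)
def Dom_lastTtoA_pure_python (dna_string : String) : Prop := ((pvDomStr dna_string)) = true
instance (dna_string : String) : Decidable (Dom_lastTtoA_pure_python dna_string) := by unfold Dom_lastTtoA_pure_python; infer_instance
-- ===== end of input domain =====

-- B replaces A's explicit backward index scan + list mutation by a single expression:
-- reverse, str.replace('T','A',1), reverse back (return value only; no side effects either way).


-- ===== PORT A =====
-- the backward loop 'for i in range(len-1, -1, -1): if dna_list[i]=='T': last_t_index=i; break':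
-- recursion on the remaining count; at step i+1 it inspects index i (always in range, so getD is exact).
def pvFindLastT (l : List Char) : Nat → Int
  | 0 => -1
  | (i+1) => if l.getD i ' ' = 'T' then (i : Int) else pvFindLastT l i

def lastTtoA_pure_python (dna_string : String) : String :=
  if dna_string = "" then dna_string
  else
    let dnaList := dna_string.toList
    let lastTIndex := pvFindLastT dnaList dnaList.length
    if lastTIndex ≠ -1 then
      -- dna_list[last_t_index] = 'A'; lastTIndex ≥ 0 here, so toNat is exact
      String.ofList (dnaList.set lastTIndex.toNat 'A')
    else String.ofList dnaList

-- ===== PORT B =====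
-- str.replace('T','A',1): replace the first occurrence only (hand port, exact)
def pvReplaceFirstT : List Char → List Char
  | [] => []
  | c :: t => if c = 'T' then 'A' :: t else c :: pvReplaceFirstT t

def lastTtoA_pure_python_alt (dna_string : String) : String :=
  String.ofList (pvReplaceFirstT dna_string.toList.reverse).reverse

-- ===== PRECONDITION & SPEC =====
def Spec_lastTtoA_pure_python (dna_string : String) (out : String) : Prop := out = lastTtoA_pure_python_alt dna_string
instance (dna_string : String) (out : String) : Decidable (Spec_lastTtoA_pure_python dna_string out) := by unfold Spec_lastTtoA_pure_python; infer_instance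

-- ===== CLAIM (what is proved, stated in full; the proofs are below) =====
def Claim_equal_lastTtoA_pure_python : Prop := ∀ (dna_string : String), Dom_lastTtoA_pure_python dna_string → Spec_lastTtoA_pure_python dna_string (lastTtoA_pure_python dna_string)

-- ===== LEMMAS AND PROOFS =====

-- the scan result is -1 or a valid index below the bound
theorem pvFindLastT_range (l : List Char) (n : Nat) :
    pvFindLastT l n = -1 ∨ (0 ≤ pvFindLastT l n ∧ pvFindLastT l n < (n : Int)) := by
  induction n with
  | zero => left; rfl
  | succ i ih =>
    simp only [pvFindLastT]
    split
    · right; constructor <;> omega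
    · rcases ih with h | h
      · left; exact h
      · right; omega

-- the scan ignores elements at positions ≥ the bound
theorem pvFindLastT_append (l : List Char) (c : Char) (n : Nat) (hn : n ≤ l.length) :
    pvFindLastT (l ++ [c]) n = pvFindLastT l n := by
  induction n with
  | zero => rfl
  | succ i ih =>
    simp only [pvFindLastT]
    rw [List.getD_append _ _ _ _ (by omega), ih (by omega)]

-- core equivalence on char lists
theorem pvCore (l : List Char) :
    (if pvFindLastT l l.length ≠ -1 then
        l.set (pvFindLastT l l.length).toNat 'A'
      else l) = (pvReplaceFirstT l.reverse).reverse := by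
  induction l using List.reverseRecOn with
  | nil => simp [pvFindLastT, pvReplaceFirstT]
  | append_singleton l c ih =>
    rw [List.reverse_append]
    simp only [List.reverse_singleton, List.singleton_append, pvReplaceFirstT,
      List.length_append, List.length_singleton]
    by_cases hc : c = 'T'
    · subst hc
      have hget : (l ++ ['T']).getD l.length ' ' = 'T' := by
        simp [List.getD_eq_getElem?_getD]
      simp only [pvFindLastT, hget, if_true]
      have hne : ((l.length : Int) ≠ -1) := by omega
      rw [if_pos hne, Int.toNat_natCast, List.set_append_right _ _ (le_refl _)]
      simp
    · have hget : (l ++ [c]).getD l.length ' ' ≠ 'T' := by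
        simpa [List.getD_eq_getElem?_getD] using hc
      simp only [pvFindLastT, if_neg hget]
      rw [pvFindLastT_append l c l.length (le_refl _), if_neg hc]
      rcases pvFindLastT_range l l.length with h | ⟨h0, hlt⟩
      · rw [if_neg (by simp [h]), List.reverse_cons, ← ih, if_neg (by simp [h])]
      · have hne : pvFindLastT l l.length ≠ -1 := by omega
        rw [if_pos hne, List.reverse_cons, ← ih, if_pos hne,
          List.set_append_left _ _ (by omega)]

-- ===== VERDICT (by name: the statement is the Claim_ definition above) =====
theorem lastTtoA_pure_python_spec : Claim_equal_lastTtoA_pure_python := by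
  intro s _
  unfold Spec_lastTtoA_pure_python lastTtoA_pure_python lastTtoA_pure_python_alt
  by_cases hs : s = ""
  · subst hs; rfl
  · rw [if_neg hs]
    simp only []
    rw [← pvCore s.toList]
    split <;> rfl
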